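-- pv_equiv track=rewrite | github.com/greenblat/vlsistuff | pybin3/ver_macro_pp2.py | has_end
-- ===== SOURCE A (Python) =====
-- def has_end(word):
--     if (word=='endmodule'):
--         return 1
--     if (word=='endprimitive'):
--         return 1
--     x = word.find('//')
--     if (x>0):
--         word = word[0:x]
--         return has_end(word)
--     x = word.find('/*')
--     if (x>0):
--         word = word[0:x]
--         return has_end(word)
--     return 0
-- ===== SOURCE B (Python) =====
-- def has_end(word):
--     # Straight-line form: the recursion cuts at the first '//' (if at a positive
--     # index), then at the first '/*' in what remains, and no further cut can fire;
--     # so do at most those two cuts and test the result once.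
--     x = word.find('//')
--     if x > 0:
--         word = word[:x]
--     x = word.find('/*')
--     if x > 0:
--         word = word[:x]
--     return 1 if word in ('endmodule', 'endprimitive') else 0
-- ===== Notes on version B (the rewrite author's own statement) =====
-- stated objective: simpler
-- what changed: Replaced the self-recursion with a straight-line computation: since the recursion can cut at most once at '//' and once at '/*', B performs those (at most) two cuts directly and tests the result against the keywords once.
import Mathlib
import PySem

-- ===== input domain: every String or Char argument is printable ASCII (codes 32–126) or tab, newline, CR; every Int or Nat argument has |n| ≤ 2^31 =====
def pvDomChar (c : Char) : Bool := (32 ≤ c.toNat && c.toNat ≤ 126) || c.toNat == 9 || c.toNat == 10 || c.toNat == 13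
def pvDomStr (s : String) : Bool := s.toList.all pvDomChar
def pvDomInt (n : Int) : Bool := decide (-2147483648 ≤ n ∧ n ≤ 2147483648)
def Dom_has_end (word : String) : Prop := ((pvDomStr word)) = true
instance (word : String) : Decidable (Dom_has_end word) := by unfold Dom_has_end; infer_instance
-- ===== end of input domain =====

-- B replaces A's self-recursion by a straight-line version (at most two cuts, one keyword test); equal return value on every input.

-- termination helper for port A (cited by decreasing_by)
theorem pvCutLt (s sub : List Char) (hs : sub ≠ []) (h : 0 < PySem.Chars.find s sub) :
    (PySem.Chars.find s sub).toNat < s.length := by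
  have hnn : (0:Int) ≤ PySem.Chars.find s sub := le_of_lt h
  obtain ⟨hpre, -⟩ := PySem.Chars.find_spec (s := s) (sub := sub) hnn
  have hne : s.drop (PySem.Chars.find s sub).toNat ≠ [] := by
    intro hnil
    rw [hnil] at hpre
    exact hs (List.prefix_nil.mp hpre)
  have hlt : ¬ s.length ≤ (PySem.Chars.find s sub).toNat :=
    fun hl => hne (List.drop_eq_nil_of_le hl)
  omega

theorem pvSliceLt (s sub : String) (hs : sub.toList ≠ []) (h : 0 < PySem.Str.find s sub) :
    (PySem.Str.slice s (some 0) (some (PySem.Str.find s sub))).toList.length < s.toList.length := by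
  have h' : 0 < PySem.Chars.find s.toList sub.toList := by simpa using h
  have hlt := pvCutLt s.toList sub.toList hs h'
  have hnn : (0:Int) ≤ PySem.Chars.find s.toList sub.toList := le_of_lt h'
  simp only [PySem.Str.toList_slice, PySem.Chars.slice_eq_listSlice,
    PySem.List.slice_zero_start, PySem.Str.find_eq]
  rw [PySem.List.slice_to _ hnn]
  simp only [List.length_take]
  omega

-- ===== PORT A =====
def has_end (word : String) : Int :=
  if word = "endmodule" then 1
  else if word = "endprimitive" then 1
  else
    let x := PySem.Str.find word "//"
    if 0 < x then has_end (PySem.Str.slice word (some 0) (some x))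
    else
      let x2 := PySem.Str.find word "/*"
      if 0 < x2 then has_end (PySem.Str.slice word (some 0) (some x2))
      else 0
termination_by word.toList.length
decreasing_by
  · exact pvSliceLt word "//" (by decide) (by assumption)
  · exact pvSliceLt word "/*" (by decide) (by assumption)

-- ===== PORT B =====
def has_end_alt (word : String) : Int :=
  let x := PySem.Str.find word "//"
  let w1 := if 0 < x then PySem.Str.slice word (some 0) (some x) else word
  let y := PySem.Str.find w1 "/*"
  let w2 := if 0 < y then PySem.Str.slice w1 (some 0) (some y) else w1
  if w2 = "endmodule" ∨ w2 = "endprimitive" then 1 else 0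

-- ===== PRECONDITION & SPEC =====
def Spec_has_end (word : String) (out : Int) : Prop := out = has_end_alt word
instance (word : String) (out : Int) : Decidable (Spec_has_end word out) := by unfold Spec_has_end; infer_instance

-- ===== CLAIM (what is proved, stated in full; the proofs are below) =====
def Claim_equal_has_end : Prop := ∀ (word : String), Dom_has_end word → Spec_has_end word (has_end word)

-- ===== LEMMAS AND PROOFS =====

-- the prefix cut at the FIRST occurrence of sub no longer contains sub
theorem pvFindTake (l t : List Char) (ht : t ≠ []) (h : 0 < PySem.Chars.find l t) :
    PySem.Chars.find (l.take (PySem.Chars.find l t).toNat) t = -1 := by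
  set n := (PySem.Chars.find l t).toNat with hn
  rw [PySem.Chars.find_eq_neg_one_iff]
  intro hinf
  obtain ⟨j, hj⟩ := (PySem.Chars.exists_prefix_drop_iff_isIn (sub := t) (s := l.take n)).mpr
    ((PySem.Chars.isIn_iff_infix t (l.take n)).mpr hinf)
  rw [List.drop_take] at hj
  by_cases hjn : j < n
  · have hdrop : t <+: l.drop j := hj.trans (List.take_prefix _ _)
    have := (PySem.Chars.find_spec (s := l) (sub := t) (le_of_lt h)).2 j (by omega)
    exact this hdrop
  · have : (l.drop j).take (n - j) = [] := by
      have : n - j = 0 := by omega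
      simp [this]
    rw [this] at hj
    exact ht (List.prefix_nil.mp hj)

-- if sub occurs at most at index 0, the same holds in any prefix
theorem pvFindTakeLe (l t : List Char) (n : Nat) (ht : t ≠ []) (h : PySem.Chars.find l t ≤ 0) :
    PySem.Chars.find (l.take n) t ≤ 0 := by
  by_contra hpos
  push Not at hpos
  have hnn : (0:Int) ≤ PySem.Chars.find (l.take n) t := le_of_lt hpos
  obtain ⟨hpre, hmin⟩ := PySem.Chars.find_spec (s := l.take n) (sub := t) hnn
  rw [List.drop_take] at hpre
  have hdrop : t <+: l.drop (PySem.Chars.find (l.take n) t).toNat :=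
    hpre.trans (List.take_prefix _ _)
  have hin : t <:+: l := (PySem.Chars.isIn_iff_infix t l).mp
    ((PySem.Chars.exists_prefix_drop_iff_isIn (sub := t) (s := l)).mp ⟨_, hdrop⟩)
  have h0 : PySem.Chars.find l t = 0 := by
    have := PySem.Chars.find_nonneg_iff (s := l) (sub := t) |>.mpr hin
    omega
  obtain ⟨hpre0, -⟩ := PySem.Chars.find_spec (s := l) (sub := t) (by omega)
  rw [h0] at hpre0
  simp only [Int.toNat_zero, List.drop_zero] at hpre0
  have hlen : t.length ≤ n := by
    have := hpre.length_le
    have htl : 0 < t.length := List.length_pos_of_ne_nil ht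
    simp [List.length_take] at this
    omega
  have h0' := hmin 0 (by omega)
  simp only [List.drop_zero] at h0'
  exact h0' (List.prefix_take_iff.mpr ⟨hpre0, hlen⟩)

-- string-level corollaries about the two cut operations
theorem pvSliceFind (w sub : String) (ht : sub.toList ≠ []) (h : 0 < PySem.Str.find w sub) :
    PySem.Str.find (PySem.Str.slice w (some 0) (some (PySem.Str.find w sub))) sub = -1 := by
  have h' : 0 < PySem.Chars.find w.toList sub.toList := by simpa using h
  have := pvFindTake w.toList sub.toList ht h'
  simp only [PySem.Str.find_eq, PySem.Str.toList_slice, PySem.Chars.slice_eq_listSlice,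
    PySem.List.slice_zero_start]
  rw [PySem.List.slice_to _ (le_of_lt h')]
  exact this

theorem pvSliceFindLe (w sub : String) (y : Int) (ht : sub.toList ≠ [])
    (hy : 0 ≤ y) (h : PySem.Str.find w sub ≤ 0) :
    PySem.Str.find (PySem.Str.slice w (some 0) (some y)) sub ≤ 0 := by
  have h' : PySem.Chars.find w.toList sub.toList ≤ 0 := by simpa using h
  simp only [PySem.Str.find_eq, PySem.Str.toList_slice, PySem.Chars.slice_eq_listSlice,
    PySem.List.slice_zero_start]
  rw [PySem.List.slice_to _ hy]
  exact pvFindTakeLe w.toList sub.toList y.toNat ht h'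

-- A under "no cut fires" computes the keyword test directly
theorem pvA_no_cut (w : String) (h1 : PySem.Str.find w "//" ≤ 0)
    (h2 : PySem.Str.find w "/*" ≤ 0) :
    has_end w = if w = "endmodule" ∨ w = "endprimitive" then 1 else 0 := by
  rw [has_end]
  by_cases hm : w = "endmodule"
  · simp [hm]
  by_cases hp : w = "endprimitive"
  · simp [hp]
  simp only [if_neg hm, if_neg hp,
    if_neg (show ¬ 0 < PySem.Str.find w "//" by omega),
    if_neg (show ¬ 0 < PySem.Str.find w "/*" by omega),
    if_neg (show ¬ (w = "endmodule" ∨ w = "endprimitive") by tauto)]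

theorem pvMain (w : String) : has_end w = has_end_alt w := by
  -- stage 1: the '//' cut
  set x := PySem.Str.find w "//" with hxdef
  have step1 : has_end w = has_end (if 0 < x then PySem.Str.slice w (some 0) (some x) else w) := by
    by_cases hx : 0 < x
    · have hm : w ≠ "endmodule" := by
        intro h; rw [h] at hxdef; rw [hxdef] at hx; revert hx; decide
      have hp : w ≠ "endprimitive" := by
        intro h; rw [h] at hxdef; rw [hxdef] at hx; revert hx; decide
      rw [has_end]
      simp only [if_neg hm, if_neg hp, if_pos (show 0 < PySem.Str.find w "//" from hxdef ▸ hx)]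
      rw [if_pos hx, hxdef]
    · rw [if_neg hx]
  set w1 := (if 0 < x then PySem.Str.slice w (some 0) (some x) else w) with hw1
  have hf1 : PySem.Str.find w1 "//" ≤ 0 := by
    rw [hw1]
    by_cases hx : 0 < x
    · simp only [hx, if_true]
      rw [hxdef]
      have := pvSliceFind w "//" (by decide) (hxdef ▸ hx)
      omega
    · rw [if_neg hx, ← hxdef]; omega
  -- stage 2: the '/*' cut
  set y := PySem.Str.find w1 "/*" with hydef
  have step2 : has_end w1 = has_end (if 0 < y then PySem.Str.slice w1 (some 0) (some y) else w1) := by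
    by_cases hy : 0 < y
    · have hm : w1 ≠ "endmodule" := by
        intro h; rw [h] at hydef; rw [hydef] at hy; revert hy; decide
      have hp : w1 ≠ "endprimitive" := by
        intro h; rw [h] at hydef; rw [hydef] at hy; revert hy; decide
      rw [has_end]
      simp only [if_neg hm, if_neg hp,
        if_neg (show ¬ 0 < PySem.Str.find w1 "//" by omega),
        if_pos (show 0 < PySem.Str.find w1 "/*" from hydef ▸ hy)]
      rw [if_pos hy, hydef]
    · rw [if_neg hy]
  set w2 := (if 0 < y then PySem.Str.slice w1 (some 0) (some y) else w1) with hw2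
  have hf2a : PySem.Str.find w2 "//" ≤ 0 := by
    rw [hw2]
    by_cases hy : 0 < y
    · simp only [hy, if_true]
      exact pvSliceFindLe w1 "//" y (by decide) (by omega) hf1
    · simpa [hy] using hf1
  have hf2b : PySem.Str.find w2 "/*" ≤ 0 := by
    rw [hw2]
    by_cases hy : 0 < y
    · simp only [hy, if_true]
      rw [hydef]
      have := pvSliceFind w1 "/*" (by decide) (hydef ▸ hy)
      omega
    · rw [if_neg hy, ← hydef]; omega
  -- assemble
  rw [step1, step2, pvA_no_cut w2 hf2a hf2b, has_end_alt]

-- ===== VERDICT (by name: the statement is the Claim_ definition above) =====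
theorem has_end_spec : Claim_equal_has_end := by
  intro word _
  unfold Spec_has_end
  exact pvMain word
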